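-- pv_equiv track=rewrite | github.com/ksayee/programming_assignments | python/CodingExercises/PrintValidWordFromArray.py | PrintValidWordFromArray
-- ===== SOURCE A (Python) =====
-- import collections
--
-- def Validate(tmp,word):
--
--     if ''.join(tmp) in word:
--         return True
--     else:
--         return False
--
-- def Combinations_recur(lst,cnt,tmp,fnl_lst,word):
--
--     if len(tmp)>0:
--         flg=Validate(tmp,word)
--         if flg==True:
--             fnl_lst.append(''.join(tmp))
--
--     for i in range(0,len(lst)):
--         if cnt[i]==0:
--             continue
--         tmp.append(lst[i])
--         cnt[i]=cnt[i]-1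
--         Combinations_recur(lst, cnt, tmp, fnl_lst, word)
--         cnt[i]=cnt[i]+1
--         tmp.pop()
--
-- def PrintValidWordFromArray(word,ary):
--
--     dict=collections.Counter(ary)
--     lst=[]
--     cnt=[]
--     for key,val in dict.items():
--         lst.append(key)
--         cnt.append(val)
--     tmp=[]
--     fnl_lst=[]
--     Combinations_recur(lst,cnt,tmp,fnl_lst,word)
--     return fnl_lst
-- ===== SOURCE B (Python) =====
-- import collections
--
-- def PrintValidWordFromArray(word, ary):
--     # Pruned DFS: extend a prefix only while it is still a substring of word,
--     # building strings directly instead of join-ing a temp list each node.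
--     cnt = collections.Counter(ary)
--     keys = list(cnt.keys())
--     out = []
--     def dfs(prefix):
--         for k in keys:
--             if cnt[k] == 0:
--                 continue
--             s = prefix + k
--             if s in word:
--                 out.append(s)
--                 cnt[k] -= 1
--                 dfs(s)
--                 cnt[k] += 1
--     dfs("")
--     return out
-- ===== Notes on version B (the rewrite author's own statement) =====
-- stated objective: faster
-- what changed: B prunes the DFS as soon as the current prefix is no longer a substring of word (a non-substring prefix can never extend to one) and builds the candidate string incrementally, instead of enumerating every permutation of the multiset and join+scanning at each node; intended as faster - in a timing run A timed out at n=16 where B returned, so no ratio could be measured.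
import Mathlib
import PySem

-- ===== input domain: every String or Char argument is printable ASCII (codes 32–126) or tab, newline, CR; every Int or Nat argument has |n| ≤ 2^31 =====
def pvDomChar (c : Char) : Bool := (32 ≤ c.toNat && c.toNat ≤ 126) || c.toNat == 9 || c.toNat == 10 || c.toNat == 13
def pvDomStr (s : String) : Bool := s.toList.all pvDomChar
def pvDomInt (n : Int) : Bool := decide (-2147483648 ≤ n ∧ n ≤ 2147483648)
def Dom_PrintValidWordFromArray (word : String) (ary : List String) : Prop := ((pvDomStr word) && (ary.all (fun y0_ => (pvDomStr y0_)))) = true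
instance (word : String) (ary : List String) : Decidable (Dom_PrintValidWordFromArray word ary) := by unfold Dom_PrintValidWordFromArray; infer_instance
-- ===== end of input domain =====

-- B prunes the DFS as soon as the current prefix is no longer a substring of `word`
-- (and builds the prefix string directly instead of join-ing a temp list at every node):
-- same output list; intended as faster (in a timing run A timed out at n=16 where B returned,
-- so no ratio could be measured).

-- termination measure lemma, cited by both ports in `decreasing_by`
theorem pvSumSetLt (cnt : List Nat) (i : Nat) (h : cnt.getD i 0 ≠ 0) :
    (cnt.set i (cnt.getD i 0 - 1)).sum < cnt.sum := by
  induction cnt generalizing i with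
  | nil => simp at h
  | cons a t ih =>
    cases i with
    | zero => simp only [List.getD_cons_zero, List.set_cons_zero, List.sum_cons] at h ⊢; omega
    | succ j =>
      simp only [List.getD_cons_succ] at h
      have := ih j h
      simp only [List.getD_cons_succ, List.set_cons_succ, List.sum_cons]
      omega

-- ===== PORT A =====
-- ''.join(tmp)
def pvJoin (tmp : List String) : String := PySem.Str.join "" tmp

-- Combinations_recur: the `for i in range(len(lst))` loop; the head of each recursive
-- call (Validate + append when len(tmp)>0) is inlined at the call site, and the
-- top-level call (tmp = [], where the head does nothing) starts directly at i = 0.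
def pvLoopA (word : String) (lst : List String) (cnt : List Nat) (tmp fnl : List String)
    (i : Nat) : List String :=
  if h : i < lst.length then
    if hc : cnt.getD i 0 ≠ 0 then
      -- tmp.append(lst[i]); cnt[i] -= 1; Combinations_recur(...); cnt[i] += 1; tmp.pop()
      -- (the recursive call first runs its head:
      --  if len(tmp)>0 and Validate(tmp,word): fnl.append(''.join(tmp)), then its own loop)
      pvLoopA word lst cnt tmp
        (pvLoopA word lst (cnt.set i (cnt.getD i 0 - 1)) (tmp ++ [lst.getD i ""])
          (if 0 < (tmp ++ [lst.getD i ""]).length ∧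
              PySem.Str.isIn (pvJoin (tmp ++ [lst.getD i ""])) word = true
           then fnl ++ [pvJoin (tmp ++ [lst.getD i ""])] else fnl) 0)
        (i + 1)
    else
      pvLoopA word lst cnt tmp fnl (i + 1)
  else fnl
termination_by (cnt.sum, lst.length - i)
decreasing_by
  · exact Prod.Lex.left _ _ (pvSumSetLt cnt i hc)
  · exact Prod.Lex.right _ (by omega)
  · exact Prod.Lex.right _ (by omega)

def PrintValidWordFromArray (word : String) (ary : List String) : List String :=
  -- dict = collections.Counter(ary); lst = keys, cnt = values (in item order).
  -- Counter values are positive counts, held as Nat (exact) so the recursion is well-founded.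
  let items := (PySem.Dict.counter ary).items
  let lst := items.map Prod.fst
  let cnt := items.map (fun kv => kv.2.toNat)
  pvLoopA word lst cnt [] [] 0

-- ===== PORT B =====
-- dfs(prefix): the `for k in keys` loop of Source B, k = keys[i]
def pvDfsB (word : String) (keys : List String) (cnt : List Nat) (pre : String)
    (out : List String) (i : Nat) : List String :=
  if h : i < keys.length then
    if hc : cnt.getD i 0 ≠ 0 then
      if PySem.Str.isIn (pre ++ keys.getD i "") word = true then
        -- out.append(s); cnt[k] -= 1; dfs(s); cnt[k] += 1
        pvDfsB word keys cnt pre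
          (pvDfsB word keys (cnt.set i (cnt.getD i 0 - 1)) (pre ++ keys.getD i "")
            (out ++ [pre ++ keys.getD i ""]) 0)
          (i + 1)
      else
        pvDfsB word keys cnt pre out (i + 1)
    else
      pvDfsB word keys cnt pre out (i + 1)
  else out
termination_by (cnt.sum, keys.length - i)
decreasing_by
  · exact Prod.Lex.left _ _ (pvSumSetLt cnt i hc)
  · exact Prod.Lex.right _ (by omega)
  · exact Prod.Lex.right _ (by omega)
  · exact Prod.Lex.right _ (by omega)

def PrintValidWordFromArray_alt (word : String) (ary : List String) : List String :=
  let d := PySem.Dict.counter ary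
  pvDfsB word d.keys (d.values.map (fun v => v.toNat)) "" [] 0

-- ===== PRECONDITION & SPEC =====
def Spec_PrintValidWordFromArray (word : String) (ary : List String) (out : List String) : Prop := out = PrintValidWordFromArray_alt word ary
instance (word : String) (ary : List String) (out : List String) : Decidable (Spec_PrintValidWordFromArray word ary out) := by unfold Spec_PrintValidWordFromArray; infer_instance

-- ===== CLAIM (what is proved, stated in full; the proofs are below) =====
def Claim_equal_PrintValidWordFromArray : Prop := ∀ (word : String) (ary : List String), Dom_PrintValidWordFromArray word ary → Spec_PrintValidWordFromArray word ary (PrintValidWordFromArray word ary)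

-- ===== LEMMAS AND PROOFS =====

theorem pvJoinNilFlatten (l : List (List Char)) : PySem.Chars.join [] l = l.flatten := by
  induction l with
  | nil => rfl
  | cons a t ih =>
    cases t with
    | nil => simp [PySem.Chars.join, List.intercalate]
    | cons b t2 =>
      rw [PySem.Chars.join_cons_cons]
      simp only [List.flatten_cons, List.nil_append, List.append_assoc] at ih ⊢
      rw [ih]

theorem pvJoin_snoc (tmp : List String) (x : String) :
    pvJoin (tmp ++ [x]) = pvJoin tmp ++ x := by
  rw [← String.toList_inj]
  simp [pvJoin, PySem.Str.toList_join, pvJoinNilFlatten, String.toList_append]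

theorem pvIsIn_mono (word : String) (tmp : List String) (x : String)
    (h : PySem.Str.isIn (pvJoin tmp) word = false) :
    PySem.Str.isIn (pvJoin (tmp ++ [x])) word = false := by
  rw [pvJoin_snoc]
  cases hx : PySem.Str.isIn (pvJoin tmp ++ x) word
  · rfl
  · exfalso
    rw [PySem.Str.isIn_eq, PySem.Chars.isIn_iff_infix, String.toList_append] at hx
    have hpre : (pvJoin tmp).toList <:+: (pvJoin tmp).toList ++ x.toList :=
      (List.prefix_append _ _).isInfix
    have hT : PySem.Str.isIn (pvJoin tmp) word = true := by
      rw [PySem.Str.isIn_eq, PySem.Chars.isIn_iff_infix]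
      exact hpre.trans hx
    rw [PySem.Str.isIn_eq] at hT h
    rw [hT] at h
    exact Bool.noConfusion h

-- arithmetic for the single Nat measure a = sum·(L+1) (+ remaining loop length)
theorem pvMeasStep (a L i n : Nat) (h : a + (L - i) ≤ n + 1) (hlt : i < L) :
    a + (L - (i + 1)) ≤ n := by omega

theorem pvMeasIn (L s s' i n : Nat) (hs : s' < s) (h : s * (L + 1) + (L - i) ≤ n + 1) :
    s' * (L + 1) + (L - 0) ≤ n := by
  have h2 : s' * (L + 1) + (L + 1) ≤ s * (L + 1) := by
    have h3 := Nat.mul_le_mul_right (L + 1) (Nat.succ_le_of_lt hs)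
    rwa [Nat.succ_mul] at h3
  generalize s' * (L + 1) = A at h2 ⊢
  generalize s * (L + 1) = B at h2 h
  omega

-- a subtree whose root prefix is not a substring of `word` appends nothing
theorem pvDead (word : String) (lst : List String) :
    ∀ (n : Nat) (cnt : List Nat) (tmp fnl : List String) (i : Nat),
      cnt.sum * (lst.length + 1) + (lst.length - i) ≤ n →
      PySem.Str.isIn (pvJoin tmp) word = false →
      pvLoopA word lst cnt tmp fnl i = fnl := by
  intro n
  induction n with
  | zero =>
    intro cnt tmp fnl i hm hf
    simp only [Nat.le_zero, Nat.add_eq_zero_iff] at hm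
    have hge : ¬ i < lst.length := by omega
    rw [pvLoopA, dif_neg hge]
  | succ n ih =>
    intro cnt tmp fnl i hm hf
    by_cases hlt : i < lst.length
    · rw [pvLoopA, dif_pos hlt]
      by_cases hc : cnt.getD i 0 ≠ 0
      · rw [dif_pos hc]
        have hs : (cnt.set i (cnt.getD i 0 - 1)).sum < cnt.sum := pvSumSetLt cnt i hc
        have hin := pvMeasIn lst.length cnt.sum ((cnt.set i (cnt.getD i 0 - 1)).sum) i n hs hm
        have hf' : PySem.Str.isIn (pvJoin (tmp ++ [lst.getD i ""])) word = false :=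
          pvIsIn_mono word tmp _ hf
        rw [if_neg (by rw [hf']; simp)]
        rw [ih _ _ _ _ hin hf']
        exact ih cnt tmp fnl (i + 1) (pvMeasStep _ _ _ _ hm hlt) hf
      · rw [dif_neg hc]
        exact ih cnt tmp fnl (i + 1) (pvMeasStep _ _ _ _ hm hlt) hf
    · rw [pvLoopA, dif_neg hlt]

-- the pruned DFS computes exactly the exhaustive DFS, node for node
theorem pvMain (word : String) (lst : List String) :
    ∀ (n : Nat) (cnt : List Nat) (tmp fnl : List String) (i : Nat),
      cnt.sum * (lst.length + 1) + (lst.length - i) ≤ n →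
      PySem.Str.isIn (pvJoin tmp) word = true →
      pvLoopA word lst cnt tmp fnl i = pvDfsB word lst cnt (pvJoin tmp) fnl i := by
  intro n
  induction n with
  | zero =>
    intro cnt tmp fnl i hm ht
    simp only [Nat.le_zero, Nat.add_eq_zero_iff] at hm
    have hge : ¬ i < lst.length := by omega
    rw [pvLoopA, dif_neg hge, pvDfsB, dif_neg hge]
  | succ n ih =>
    intro cnt tmp fnl i hm ht
    by_cases hlt : i < lst.length
    · rw [pvLoopA, dif_pos hlt, pvDfsB, dif_pos hlt]
      have houter := pvMeasStep (cnt.sum * (lst.length + 1)) lst.length i n hm hlt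
      by_cases hc : cnt.getD i 0 ≠ 0
      · rw [dif_pos hc, dif_pos hc]
        have hs : (cnt.set i (cnt.getD i 0 - 1)).sum < cnt.sum := pvSumSetLt cnt i hc
        have hin := pvMeasIn lst.length cnt.sum ((cnt.set i (cnt.getD i 0 - 1)).sum) i n hs hm
        have hsnoc : pvJoin (tmp ++ [lst.getD i ""]) = pvJoin tmp ++ lst.getD i "" :=
          pvJoin_snoc tmp _
        cases hx : PySem.Str.isIn (pvJoin tmp ++ lst.getD i "") word with
        | true =>
          rw [if_pos rfl]
          rw [if_pos ⟨by simp, by rw [hsnoc]; exact hx⟩]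
          rw [ih _ _ _ _ hin (by rw [hsnoc]; exact hx), hsnoc]
          exact ih cnt tmp _ (i + 1) houter ht
        | false =>
          rw [if_neg (fun hA : (0 < (tmp ++ [lst.getD i ""]).length ∧
              PySem.Str.isIn (pvJoin (tmp ++ [lst.getD i ""])) word = true) =>
            absurd hA.2 (by rw [hsnoc, hx]; simp))]
          rw [if_neg (fun hB : (false = true) => Bool.noConfusion hB)]
          rw [pvDead word lst n _ _ _ 0 hin (by rw [hsnoc]; exact hx)]
          exact ih cnt tmp fnl (i + 1) houter ht
      · rw [dif_neg hc, dif_neg hc]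
        exact ih cnt tmp fnl (i + 1) houter ht
    · rw [pvLoopA, dif_neg hlt, pvDfsB, dif_neg hlt]

theorem pvJoin_nil : pvJoin [] = "" := by
  rw [← String.toList_inj]
  simp [pvJoin, PySem.Str.toList_join]

theorem pvIsIn_empty (word : String) : PySem.Str.isIn "" word = true := by
  rw [PySem.Str.isIn_eq]
  exact PySem.Chars.isIn_nil word.toList

-- ===== VERDICT (by name: the statement is the Claim_ definition above) =====
theorem PrintValidWordFromArray_spec : Claim_equal_PrintValidWordFromArray := by
  intro word ary _
  unfold Spec_PrintValidWordFromArray PrintValidWordFromArray PrintValidWordFromArray_alt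
  simp only [PySem.Dict.keys, PySem.Dict.values, List.map_map]
  have h := pvMain word ((PySem.Dict.counter ary).items.map (fun x => x.1))
    (((PySem.Dict.counter ary).items.map (fun kv => kv.2.toNat)).sum *
        (((PySem.Dict.counter ary).items.map (fun x => x.1)).length + 1) +
      ((PySem.Dict.counter ary).items.map (fun x => x.1)).length)
    ((PySem.Dict.counter ary).items.map (fun kv => kv.2.toNat)) [] [] 0
    (by omega) (by rw [pvJoin_nil]; exact pvIsIn_empty word)
  rw [pvJoin_nil] at h
  exact h.trans rfl
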